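-- pv_equiv track=rewrite | github.com/rabiulcste/vismin | ctrl_edit/utils/helpers.py | group_outputs_for_batch_repeats
-- ===== SOURCE A (Python) =====
-- def group_outputs_for_batch_repeats(
--     all_generated_outputs: list, batch_size: int, repeat_times: int, num_return_sequences: int
-- ):
--     grouped_outputs = [[] for _ in range(batch_size)]
--     for idx in range(batch_size):
--         for repeat_idx in range(repeat_times):
--             start_index = idx * num_return_sequences + repeat_idx * (batch_size * num_return_sequences)
--             grouped_outputs[idx].extend(all_generated_outputs[start_index : start_index + num_return_sequences])
--     return grouped_outputs
-- ===== SOURCE B (Python) =====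
-- def group_outputs_for_batch_repeats(
--     all_generated_outputs: list, batch_size: int, repeat_times: int, num_return_sequences: int
-- ):
--     grouped_outputs = [[] for _ in range(batch_size)]
--     n = num_return_sequences
--     if batch_size > 0 and n > 0:
--         limit = min(len(all_generated_outputs), batch_size * repeat_times * n)
--         for p in range(limit):
--             grouped_outputs[(p // n) % batch_size].append(all_generated_outputs[p])
--     return grouped_outputs
-- ===== Notes on version B (the rewrite author's own statement) =====
-- stated objective: faster
-- what changed: Replaces A's nested batch/repeat loops that slice out every chunk and extend per-group accumulators by a single element-level pass over the relevant prefix of the flat list, routing element p to group (p // num_return_sequences) % batch_size; the loop is bounded by min(len, batch_size*repeat_times*num_return_sequences), so B does no work for chunk positions beyond the data while A iterates all batch_size*repeat_times chunks regardless.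
-- intended difference: When num_return_sequences < 0 with positive batch_size and repeat_times and a list longer than |num_return_sequences|, A's negative slice bound wraps around and it returns all but the last |num_return_sequences| elements in group 0; B returns all-empty groups, the intended value since a non-positive chunk size selects nothing. — e.g. on group_outputs_for_batch_repeats([1, 2, 3], 1, 1, -1): A returns [[1, 2]], B returns [[]]
import Mathlib
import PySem

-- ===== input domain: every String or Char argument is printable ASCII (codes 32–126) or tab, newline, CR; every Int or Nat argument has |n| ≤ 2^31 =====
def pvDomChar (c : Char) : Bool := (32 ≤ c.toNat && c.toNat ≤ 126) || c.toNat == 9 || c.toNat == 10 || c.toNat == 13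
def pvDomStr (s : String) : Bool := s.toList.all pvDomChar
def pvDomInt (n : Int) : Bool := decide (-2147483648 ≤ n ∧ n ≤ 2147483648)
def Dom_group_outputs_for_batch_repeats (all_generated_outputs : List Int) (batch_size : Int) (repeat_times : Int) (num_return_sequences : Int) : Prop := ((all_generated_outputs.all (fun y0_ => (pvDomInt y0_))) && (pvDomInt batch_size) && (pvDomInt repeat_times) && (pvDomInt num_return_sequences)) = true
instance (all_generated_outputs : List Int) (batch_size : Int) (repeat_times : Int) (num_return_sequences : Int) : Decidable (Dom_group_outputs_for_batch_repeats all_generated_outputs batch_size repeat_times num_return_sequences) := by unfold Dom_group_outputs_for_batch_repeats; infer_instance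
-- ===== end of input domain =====

-- B replaces A's nested chunk-slicing loops by one element-level pass over the relevant
-- prefix of the flat list, routing each element to its group by index arithmetic
-- (objective: faster, measured; A iterates all batch_size*repeat_times chunks,
-- B only min(len, batch_size*repeat_times*num_return_sequences) elements); on
-- num_return_sequences < 0 B is intentionally different (see D_).

-- ===== PORT A =====
-- Literal port of A. grouped_outputs[idx].extend(...) is List.modify at idx; idx comes from
-- range(batch_size) so idx ≥ 0 and idx.toNat is exact.
def group_outputs_for_batch_repeats (all_generated_outputs : List Int) (batch_size : Int) (repeat_times : Int) (num_return_sequences : Int) : List (List Int) :=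
  let grouped := (PySem.List.pyRange 0 batch_size 1).map (fun _ => ([] : List Int))
  (PySem.List.pyRange 0 batch_size 1).foldl (fun g idx =>
    (PySem.List.pyRange 0 repeat_times 1).foldl (fun g repeat_idx =>
      let start_index := idx * num_return_sequences + repeat_idx * (batch_size * num_return_sequences)
      g.modify idx.toNat
        (fun row => row ++ PySem.List.slice all_generated_outputs (some start_index) (some (start_index + num_return_sequences)))) g)
    grouped

-- ===== PORT B =====
-- Literal port of Source B. Inside the loop p < limit ≤ len, so all_generated_outputs[p] never
-- raises and the .getD 0 after pyGet? is an unreachable totality default; likewise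
-- (p // n) % batch_size is nonnegative there, so .toNat is exact.
def group_outputs_for_batch_repeats_alt (all_generated_outputs : List Int) (batch_size : Int) (repeat_times : Int) (num_return_sequences : Int) : List (List Int) :=
  let grouped := (PySem.List.pyRange 0 batch_size 1).map (fun _ => ([] : List Int))
  let n := num_return_sequences
  if 0 < batch_size ∧ 0 < n then
    -- limit = min(len(all_generated_outputs), batch_size * repeat_times * n), inlined
    (PySem.List.pyRange 0 (min ((all_generated_outputs.length : Int)) (batch_size * repeat_times * n)) 1).foldl (fun g p =>
      g.modify (PySem.Int.mod (PySem.Int.floordiv p n) batch_size).toNat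
        (fun row => row ++ [(PySem.List.pyGet? all_generated_outputs p).getD 0])) grouped
  else grouped

-- ===== PRECONDITION & SPEC =====
-- When num_return_sequences < 0 with positive batch_size and repeat_times and a list longer
-- than |num_return_sequences|, A's negative slice bound wraps around and it returns all but
-- the last |num_return_sequences| elements in group 0; B returns all-empty groups, the
-- intended value since a non-positive chunk size selects nothing.
def D_group_outputs_for_batch_repeats (all_generated_outputs : List Int) (batch_size : Int) (repeat_times : Int) (num_return_sequences : Int) : Prop :=
  num_return_sequences < 0 ∧ 0 < batch_size ∧ 0 < repeat_times ∧
    0 < (all_generated_outputs.length : Int) + num_return_sequences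
instance (all_generated_outputs : List Int) (batch_size : Int) (repeat_times : Int) (num_return_sequences : Int) : Decidable (D_group_outputs_for_batch_repeats all_generated_outputs batch_size repeat_times num_return_sequences) := by unfold D_group_outputs_for_batch_repeats; infer_instance

def Spec_group_outputs_for_batch_repeats (all_generated_outputs : List Int) (batch_size : Int) (repeat_times : Int) (num_return_sequences : Int) (out : List (List Int)) : Prop := ¬ D_group_outputs_for_batch_repeats all_generated_outputs batch_size repeat_times num_return_sequences → out = group_outputs_for_batch_repeats_alt all_generated_outputs batch_size repeat_times num_return_sequences
instance (all_generated_outputs : List Int) (batch_size : Int) (repeat_times : Int) (num_return_sequences : Int) (out : List (List Int)) : Decidable (Spec_group_outputs_for_batch_repeats all_generated_outputs batch_size repeat_times num_return_sequences out) := by unfold Spec_group_outputs_for_batch_repeats; infer_instance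

def pvDiffWitness_group_outputs_for_batch_repeats : List Int × Int × Int × Int := ([1, 2, 3], 1, 1, -1)
def pvDiffWitnessOut_group_outputs_for_batch_repeats : (List (List Int)) × (List (List Int)) := ([[1, 2]], [[]])

-- ===== CLAIM (what is proved, stated in full; the proofs are below) =====
def Claim_unchanged_group_outputs_for_batch_repeats : Prop := ∀ (all_generated_outputs : List Int) (batch_size : Int) (repeat_times : Int) (num_return_sequences : Int), Dom_group_outputs_for_batch_repeats all_generated_outputs batch_size repeat_times num_return_sequences → Spec_group_outputs_for_batch_repeats all_generated_outputs batch_size repeat_times num_return_sequences (group_outputs_for_batch_repeats all_generated_outputs batch_size repeat_times num_return_sequences)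
def Claim_changed_group_outputs_for_batch_repeats : Prop := Dom_group_outputs_for_batch_repeats (pvDiffWitness_group_outputs_for_batch_repeats.1) (pvDiffWitness_group_outputs_for_batch_repeats.2.1) (pvDiffWitness_group_outputs_for_batch_repeats.2.2.1) (pvDiffWitness_group_outputs_for_batch_repeats.2.2.2) ∧ D_group_outputs_for_batch_repeats (pvDiffWitness_group_outputs_for_batch_repeats.1) (pvDiffWitness_group_outputs_for_batch_repeats.2.1) (pvDiffWitness_group_outputs_for_batch_repeats.2.2.1) (pvDiffWitness_group_outputs_for_batch_repeats.2.2.2) ∧ group_outputs_for_batch_repeats (pvDiffWitness_group_outputs_for_batch_repeats.1) (pvDiffWitness_group_outputs_for_batch_repeats.2.1) (pvDiffWitness_group_outputs_for_batch_repeats.2.2.1) (pvDiffWitness_group_outputs_for_batch_repeats.2.2.2) = pvDiffWitnessOut_group_outputs_for_batch_repeats.1 ∧ group_outputs_for_batch_repeats_alt (pvDiffWitness_group_outputs_for_batch_repeats.1) (pvDiffWitness_group_outputs_for_batch_repeats.2.1) (pvDiffWitness_group_outputs_for_batch_repeats.2.2.1) (pvDiffWitness_group_outputs_for_batch_repeats.2.2.2)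 = pvDiffWitnessOut_group_outputs_for_batch_repeats.2 ∧ pvDiffWitnessOut_group_outputs_for_batch_repeats.1 ≠ pvDiffWitnessOut_group_outputs_for_batch_repeats.2
def Claim_exact_group_outputs_for_batch_repeats : Prop := ∀ (all_generated_outputs : List Int) (batch_size : Int) (repeat_times : Int) (num_return_sequences : Int), Dom_group_outputs_for_batch_repeats all_generated_outputs batch_size repeat_times num_return_sequences → D_group_outputs_for_batch_repeats all_generated_outputs batch_size repeat_times num_return_sequences → group_outputs_for_batch_repeats all_generated_outputs batch_size repeat_times num_return_sequences ≠ group_outputs_for_batch_repeats_alt all_generated_outputs batch_size repeat_times num_return_sequences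

-- ===== LEMMAS AND PROOFS =====

-- fold of "modify index (t c) by appending f c" : length is preserved
theorem pv_foldl_modify_length {α : Type} (cs : List α) (t : α → Nat) (f : α → List Int)
    (init : List (List Int)) :
    (cs.foldl (fun g c => g.modify (t c) (fun row => row ++ f c)) init).length = init.length := by
  induction cs generalizing init with
  | nil => rfl
  | cons c cs ih => simp [List.foldl_cons, ih]

-- fold of "modify index (t c) by appending f c" : entry i collects exactly the pieces routed to i
theorem pv_foldl_modify_getD {α : Type} (cs : List α) (t : α → Nat) (f : α → List Int)
    (init : List (List Int)) (i : Nat) (hi : i < init.length) :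
    (cs.foldl (fun g c => g.modify (t c) (fun row => row ++ f c)) init).getD i [] =
      init.getD i [] ++ (cs.filter (fun c => t c == i)).flatMap f := by
  induction cs generalizing init with
  | nil => simp
  | cons c cs ih =>
      rw [List.foldl_cons, ih _ (by simpa using hi), List.filter_cons]
      by_cases h : t c = i
      · subst h
        rw [List.getD_eq_getElem?_getD, List.getElem?_modify, List.getElem?_eq_getElem hi,
          List.getD_eq_getElem?_getD, List.getElem?_eq_getElem hi]
        simp
      · simp only [beq_iff_eq, h, if_false]
        rw [List.getD_eq_getElem?_getD, List.getElem?_modify,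
          List.getD_eq_getElem?_getD]
        simp [h]

-- nested foldl = foldl over the flattened list of pairs
theorem pv_foldl_foldl {α β γ : Type} (outer : List α) (inner : List β)
    (step : γ → α → β → γ) (init : γ) :
    outer.foldl (fun g x => inner.foldl (fun g y => step g x y) g) init =
      (outer.flatMap (fun x => inner.map (fun y => (x, y)))).foldl
        (fun g p => step g p.1 p.2) init := by
  induction outer generalizing init with
  | nil => rfl
  | cons x xs ih => simp [List.foldl_cons, List.flatMap_cons, List.foldl_append, List.foldl_map, ih]

-- a flatMap over range n whose blocks are empty except at i < n collapses to the i-th block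
theorem pv_flatMap_range_ite {γ : Type} (n i : Nat) (hi : i < n) (L : Nat → List γ) :
    ((List.range n).flatMap (fun x => if x = i then L x else [])) = L i := by
  induction n with
  | zero => omega
  | succ n ih =>
      rw [List.range_succ, List.flatMap_append]
      by_cases h : i = n
      · subst h
        have he : ((List.range i).flatMap (fun x => if x = i then L x else [])) = [] := by
          simp only [List.flatMap_eq_nil_iff]
          intro x hx
          simp [Nat.ne_of_lt (List.mem_range.mp hx)]
        simp [he]
      · have hin : i < n := by omega
        simp [ih hin, Ne.symm h]

-- the only j < b with j = i is i itself
theorem pv_filter_range_eq (b i : Nat) (hib : i < b) :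
    (List.range b).filter (fun j => j == i) = [i] := by
  induction b with
  | zero => omega
  | succ b ihb =>
      rw [List.range_succ, List.filter_append]
      by_cases h : i = b
      · subst h
        have he : (List.range i).filter (fun j => j == i) = [] := by
          simp only [List.filter_eq_nil_iff]
          intro j hj
          simp [Nat.ne_of_lt (List.mem_range.mp hj)]
        simp [he]
      · have hib' : i < b := by omega
        simp [ihb hib', Ne.symm h]

-- which chunk indices are routed to group i: c % b = i on range (r*b) means c = k*b + i
theorem pv_filter_range_mod (r b i : Nat) (hib : i < b) :
    ((List.range (r * b)).filter (fun c => c % b == i)) =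
      (List.range r).map (fun k => k * b + i) := by
  induction r with
  | zero => simp
  | succ r ih =>
      have hsp : (r + 1) * b = r * b + b := by ring
      rw [hsp, List.range_add, List.filter_append, ih, List.range_succ, List.map_append]
      congr 1
      rw [List.filter_map]
      have hc : ∀ j ∈ List.range b,
          ((fun c => c % b == i) ∘ (fun x => r * b + x)) j = (j == i) := by
        intro j hj
        have hjb := List.mem_range.mp hj
        simp [Nat.add_comm (r * b) j, Nat.add_mul_mod_self_right, Nat.mod_eq_of_lt hjb]
      rw [List.filter_congr hc, pv_filter_range_eq b i hib]
      simp [Nat.mul_comm r b]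

-- range(0, n) over a Nat bound, as a mapped Nat range
theorem pv_pyRange0 (n : Nat) :
    PySem.List.pyRange 0 (n : Int) 1 = List.map (fun k : Nat => (k : Int)) (List.range n) := by
  rw [PySem.List.pyRange_one]
  simp

-- a list with known length whose entries are F i is the mapped range
theorem pv_eq_map_range {res : List (List Int)} {n : Nat} {F : Nat → List Int}
    (hl : res.length = n) (h : ∀ i, i < n → res.getD i [] = F i) :
    res = (List.range n).map F := by
  apply List.ext_getElem (by simpa using hl)
  intro i h1 h2
  have := h i (by omega)
  rw [List.getD_eq_getElem _ _ (by omega)] at this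
  simpa using this

-- flatMap congruence on members
theorem pv_flatMap_congr {α γ : Type} (l : List α) (f g : α → List γ)
    (h : ∀ x ∈ l, f x = g x) : l.flatMap f = l.flatMap g := by
  induction l with
  | nil => rfl
  | cons x xs ih =>
      rw [List.flatMap_cons, List.flatMap_cons, h x (by simp),
        ih (fun y hy => h y (by simp [hy]))]

-- flatMap of singletons is map
theorem pv_flatMap_singleton {α γ : Type} (l : List α) (g : α → γ) :
    l.flatMap (fun x => [g x]) = l.map g := by
  induction l with
  | nil => rfl
  | cons x xs ih => rw [List.flatMap_cons, List.map_cons, ih]; rfl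

-- flatMap with an if-guard is flatMap over the filtered list
theorem pv_flatMap_ite_filter {α γ : Type} (l : List α) (q : α → Bool) (F : α → List γ) :
    l.flatMap (fun x => if q x then F x else []) = (l.filter q).flatMap F := by
  induction l with
  | nil => rfl
  | cons x xs ih =>
      rw [List.flatMap_cons, List.filter_cons]
      by_cases h : q x
      · simp only [h, if_true, List.flatMap_cons, ih]
      · simp only [h, Bool.false_eq_true, if_false, List.nil_append, ih]

-- the prefix of range K below L
theorem pv_range_filter_lt (K L : Nat) :
    (List.range K).filter (fun p => p < L) = List.range (min K L) := by
  induction K with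
  | zero => simp
  | succ K ih =>
      rw [List.range_succ, List.filter_append, ih]
      by_cases h : K < L
      · have : min (K + 1) L = min K L + 1 := by omega
        have h2 : min K L = K := by omega
        simp [h, h2, List.range_succ]
      · have : min (K + 1) L = min K L := by omega
        simp [h, this]

-- range (N*n) split into N consecutive blocks of n
theorem pv_range_mul (N n : Nat) :
    List.range (N * n) = (List.range N).flatMap (fun c => (List.range n).map (fun j => c * n + j)) := by
  induction N with
  | zero => simp
  | succ N ih =>
      have h : (N + 1) * n = N * n + n := by ring
      rw [h, List.range_add, ih, List.range_succ, List.flatMap_append]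
      simp

-- reading the window [a, a+n) of xs element by element is drop/take
theorem pv_map_get_window (xs : List Int) (a n : Nat) :
    ((List.range (min n (xs.length - a))).map
        (fun j => (PySem.List.pyGet? xs ((a + j : Nat) : Int)).getD 0)) =
      (xs.drop a).take n := by
  apply List.ext_getElem
  · simp
  · intro i h1 h2
    have hi : a + i < xs.length := by simp at h1; omega
    simp only [List.getElem_map, List.getElem_range, PySem.List.pyGet?_natCast,
      List.getElem_take, List.getElem_drop]
    rw [List.getElem?_eq_getElem hi]
    rfl

-- a slice whose clamped end does not exceed its clamped start is empty
theorem pv_slice_empty (xs : List Int) (a b : Int)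
    (h : PySem.List.clampIdx xs.length b ≤ PySem.List.clampIdx xs.length a) :
    PySem.List.slice xs (some a) (some b) = [] := by
  apply List.eq_nil_of_length_eq_zero
  rw [PySem.List.length_slice]
  omega

-- characterization of A's port for nonnegative batch_size / repeat_times (any num_return_sequences)
theorem pvA_char (xs : List Int) (nrs : Int) (b' r' : Nat) :
    group_outputs_for_batch_repeats xs (b' : Int) (r' : Int) nrs =
      (List.range b').map (fun i : Nat => (List.range r').flatMap (fun r : Nat =>
        PySem.List.slice xs (some ((i : Int) * nrs + (r : Int) * ((b' : Int) * nrs)))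
          (some ((i : Int) * nrs + (r : Int) * ((b' : Int) * nrs) + nrs)))) := by
  unfold group_outputs_for_batch_repeats
  rw [pv_pyRange0 b', pv_pyRange0 r']
  simp only []
  refine Eq.trans (pv_foldl_foldl (List.map (fun k : Nat => (k : Int)) (List.range b'))
      (List.map (fun k : Nat => (k : Int)) (List.range r'))
      (fun (g : List (List Int)) (x y : Int) => g.modify x.toNat (fun row => row ++
        PySem.List.slice xs (some (x * nrs + y * ((b' : Int) * nrs)))
          (some (x * nrs + y * ((b' : Int) * nrs) + nrs)))) _) ?_
  rw [List.flatMap_map]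
  simp only [List.map_map]
  apply pv_eq_map_range
  · exact Eq.trans (pv_foldl_modify_length _ (fun p : Int × Int => p.1.toNat)
      (fun p : Int × Int => PySem.List.slice xs
        (some (p.1 * nrs + p.2 * ((b' : Int) * nrs)))
        (some (p.1 * nrs + p.2 * ((b' : Int) * nrs) + nrs))) _) (by simp)
  · intro i hi
    refine Eq.trans (pv_foldl_modify_getD _ (fun p : Int × Int => p.1.toNat)
      (fun p : Int × Int => PySem.List.slice xs
        (some (p.1 * nrs + p.2 * ((b' : Int) * nrs)))
        (some (p.1 * nrs + p.2 * ((b' : Int) * nrs) + nrs))) _ i (by simpa using hi)) ?_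
    simp only [Function.comp_def]
    have hinit : ((List.range b').map (fun _ : Nat => ([] : List Int))).getD i [] = [] := by
      rcases Nat.lt_or_ge i b' with h | h
      · rw [List.getD_eq_getElem _ _ (by simpa using h)]
        simp
      · rw [List.getD_eq_default _ _ (by simpa using h)]
    rw [hinit, List.nil_append, List.filter_flatMap]
    have hblk : ∀ k : Nat,
        (List.filter (fun c : Int × Int => c.1.toNat == i)
            ((List.range r').map (fun r : Nat => ((k : Int), (r : Int))))) =
          if k = i then (List.range r').map (fun r : Nat => ((k : Int), (r : Int))) else [] := by
      intro k
      rw [List.filter_map]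
      by_cases h : k = i
      · subst h
        simp [Function.comp_def]
      · simp [Function.comp_def, h]
    simp only [hblk]
    rw [pv_flatMap_range_ite b' i (by simpa using hi)]
    rw [List.flatMap_map]

-- characterization of B's port for positive batch_size and num_return_sequences, nonneg repeats
theorem pvB_char (xs : List Int) (b' r' n' : Nat) (hb : 0 < b') (hn : 0 < n') :
    group_outputs_for_batch_repeats_alt xs (b' : Int) (r' : Int) (n' : Int) =
      (List.range b').map (fun i : Nat => (List.range r').flatMap (fun rep : Nat =>
        (xs.drop ((rep * b' + i) * n')).take n')) := by
  unfold group_outputs_for_batch_repeats_alt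
  rw [if_pos ⟨by exact_mod_cast hb, by exact_mod_cast hn⟩]
  have hK : (b' : Int) * (r' : Int) * (n' : Int) = ((r' * b' * n' : Nat) : Int) := by
    push_cast; ring
  have hM : min ((xs.length : Int)) ((b' : Int) * (r' : Int) * (n' : Int)) =
      ((min (r' * b' * n') xs.length : Nat) : Int) := by
    rw [hK, Nat.cast_min, min_comm]
  rw [hM, pv_pyRange0 (min (r' * b' * n') xs.length), pv_pyRange0 b', List.foldl_map]
  simp only [List.map_map, Function.comp_def]
  apply pv_eq_map_range
  · exact Eq.trans (pv_foldl_modify_length _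
      (fun p : Nat => (PySem.Int.mod (PySem.Int.floordiv (p : Int) (n' : Int)) (b' : Int)).toNat)
      (fun p : Nat => [(PySem.List.pyGet? xs ((p : Nat) : Int)).getD 0]) _) (by simp)
  · intro i hi
    refine Eq.trans (pv_foldl_modify_getD _
      (fun p : Nat => (PySem.Int.mod (PySem.Int.floordiv (p : Int) (n' : Int)) (b' : Int)).toNat)
      (fun p : Nat => [(PySem.List.pyGet? xs ((p : Nat) : Int)).getD 0]) _ i (by simpa using hi)) ?_
    have hinit : ((List.range b').map (fun _ : Nat => ([] : List Int))).getD i [] = [] := by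
      rcases Nat.lt_or_ge i b' with h | h
      · rw [List.getD_eq_getElem _ _ (by simpa using h)]
        simp
      · rw [List.getD_eq_default _ _ (by simpa using h)]
    rw [hinit, List.nil_append, pv_flatMap_singleton]
    -- the routing function is p / n' % b' over Nat
    have hroute : ∀ p : Nat,
        ((PySem.Int.mod (PySem.Int.floordiv (p : Int) (n' : Int)) (b' : Int)).toNat == i) =
          (p / n' % b' == i) := by
      intro p
      rw [PySem.Int.floordiv_natCast, PySem.Int.mod_natCast]
      simp only [Int.toNat_natCast]
    rw [List.filter_congr (fun p _ => hroute p)]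
    -- cut the capped range out of the full range, then split into chunks
    rw [← pv_range_filter_lt (r' * b' * n') xs.length, List.filter_filter, pv_range_mul (r' * b') n',
      List.filter_flatMap, List.map_flatMap]
    refine Eq.trans (pv_flatMap_congr _ _
      (fun c : Nat => if c % b' == i then (xs.drop (c * n')).take n' else []) ?_) ?_
    · intro c _
      rw [List.filter_map, List.map_map]
      have hc : ∀ j ∈ List.range n',
          ((fun p => (p / n' % b' == i) && decide (p < xs.length)) ∘
            (fun j => c * n' + j)) j =
            ((c % b' == i) && decide (j < xs.length - c * n')) := by
        intro j hj
        have hjn : j < n' := List.mem_range.mp hj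
        have hdiv : (c * n' + j) / n' = c := by
          rw [Nat.mul_comm c n', Nat.mul_add_div hn]
          simp [Nat.div_eq_of_lt hjn]
        simp only [Function.comp_def, hdiv]
        by_cases hlt : c * n' + j < xs.length
        · have : j < xs.length - c * n' := by omega
          simp [hlt, this]
        · have : ¬ j < xs.length - c * n' := by omega
          simp [hlt, this]
      rw [List.filter_congr hc]
      by_cases hcb : c % b' = i
      · simp only [hcb, BEq.rfl, Bool.true_and, if_true]
        rw [pv_range_filter_lt n' (xs.length - c * n')]
        simp only [Function.comp_def]
        exact pv_map_get_window xs (c * n') n'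
      · have hcb' : (c % b' == i) = false := by simpa using hcb
        simp [hcb']
    · rw [pv_flatMap_ite_filter (List.range (r' * b')) (fun c => c % b' == i)
        (fun c => (xs.drop (c * n')).take n'),
        pv_filter_range_mod r' b' i (by simpa using hi), List.flatMap_map]

-- A's double fold collapses to the initial accumulator when the inner range is empty
theorem pv_foldl_id {α γ : Type} (l : List α) (init : γ) :
    l.foldl (fun g _ => g) init = init := by
  induction l generalizing init with
  | nil => rfl
  | cons x xs ih => rw [List.foldl_cons]; exact ih init

-- B returns batch_size empty groups whenever its loop guard or loop is vacuous
theorem pvB_empty (xs : List Int) (bs rt n : Int)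
    (h : ¬ (0 < bs ∧ 0 < n) ∨ min ((xs.length : Int)) (bs * rt * n) ≤ 0) :
    group_outputs_for_batch_repeats_alt xs bs rt n =
      (PySem.List.pyRange 0 bs 1).map (fun _ => ([] : List Int)) := by
  unfold group_outputs_for_batch_repeats_alt
  rcases h with h | h
  · rw [if_neg h]
  · by_cases hg : 0 < bs ∧ 0 < n
    · rw [if_pos hg, PySem.List.pyRange_one_eq_nil h, List.foldl_nil]
    · rw [if_neg hg]

-- ===== VERDICT (by name: the statement is the Claim_ definition above) =====
theorem group_outputs_for_batch_repeats_spec : Claim_unchanged_group_outputs_for_batch_repeats := by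
  intro xs bs rt nrs _ hnd
  unfold D_group_outputs_for_batch_repeats at hnd
  by_cases hbs : bs ≤ 0
  · -- batch_size ≤ 0: both sides are batch_size (= zero) empty groups
    have hA : PySem.List.pyRange 0 bs 1 = [] := PySem.List.pyRange_one_eq_nil hbs
    unfold group_outputs_for_batch_repeats
    rw [pvB_empty xs bs rt nrs (Or.inl (by omega)), hA]
    rfl
  · obtain ⟨b', rfl⟩ : ∃ b' : Nat, bs = (b' : Int) :=
      ⟨bs.toNat, (Int.toNat_of_nonneg (by omega)).symm⟩
    have hb : 0 < b' := by omega
    by_cases hrt : 0 ≤ rt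
    · obtain ⟨r', rfl⟩ : ∃ r' : Nat, rt = (r' : Int) := ⟨rt.toNat, (Int.toNat_of_nonneg hrt).symm⟩
      by_cases hn : 0 < nrs
      · -- main case: positive chunk size
        obtain ⟨n', rfl⟩ : ∃ n' : Nat, nrs = (n' : Int) :=
          ⟨nrs.toNat, (Int.toNat_of_nonneg (by omega)).symm⟩
        have hn' : 0 < n' := by omega
        rw [pvA_char, pvB_char xs b' r' n' hb hn']
        apply List.map_congr_left
        intro i _
        apply pv_flatMap_congr
        intro rep _
        have h1 : (i : Int) * (n' : Int) + (rep : Int) * ((b' : Int) * (n' : Int)) =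
            (((rep * b' + i) * n' : Nat) : Int) := by push_cast; ring
        have h2 : ((((rep * b' + i) * n' : Nat)) : Int) + (n' : Int) =
            ((((rep * b' + i) * n' + n' : Nat)) : Int) := by push_cast; ring
        rw [h1, h2, PySem.List.slice_natCast]
        have h3 : (rep * b' + i) * n' + n' - (rep * b' + i) * n' = n' := by omega
        rw [h3]
      · -- num_return_sequences ≤ 0 outside D_: every chunk of A is empty, B's loop is vacuous
        rw [pvA_char, pvB_empty xs (b' : Int) (r' : Int) nrs
            (Or.inl (by rintro ⟨_, h⟩; exact hn h)), pv_pyRange0 b', List.map_map]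
        apply List.map_congr_left
        intro i hi
        have hallnil : ∀ rep ∈ List.range r',
            PySem.List.slice xs (some ((i : Int) * nrs + (rep : Int) * ((b' : Int) * nrs)))
              (some ((i : Int) * nrs + (rep : Int) * ((b' : Int) * nrs) + nrs)) = [] := by
          intro rep hrep
          set s : Int := (i : Int) * nrs + (rep : Int) * ((b' : Int) * nrs) with hs
          have hnn : nrs ≤ 0 := by omega
          have hsnonpos : s ≤ 0 := by
            have h1 : (i : Int) * nrs ≤ 0 :=
              mul_nonpos_of_nonneg_of_nonpos (by positivity) hnn
            have h2 : (rep : Int) * ((b' : Int) * nrs) ≤ 0 :=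
              mul_nonpos_of_nonneg_of_nonpos (by positivity)
                (mul_nonpos_of_nonneg_of_nonpos (by positivity) hnn)
            omega
          apply pv_slice_empty
          -- both bounds are ≤ 0 or clamp from the end; D_'s negation bounds the wrap
          by_cases hzero : nrs = 0
          · rw [show s + nrs = s by omega]
          · have hneg : nrs < 0 := by omega
            -- ¬D_ here gives r' = 0 (impossible since rep < r' … handled) or len + nrs ≤ 0
            have hr0 : 0 < r' := by have := List.mem_range.mp hrep; omega
            have hlen : (xs.length : Int) + nrs ≤ 0 := by
              by_contra hpos
              exact hnd ⟨hneg, by exact_mod_cast hb, by exact_mod_cast hr0, by omega⟩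
            -- clampIdx of any value ≤ len + nrs ≤ 0 … both clamps below: compute directly
            have hc1 : PySem.List.clampIdx xs.length (s + nrs) = 0 := by
              simp only [PySem.List.clampIdx]
              split_ifs with h1 h2 <;> omega
            have hc2 : 0 ≤ PySem.List.clampIdx xs.length s := by
              simp only [PySem.List.clampIdx]
              split_ifs with h1 h2 <;> omega
            omega
        rw [List.flatMap_eq_nil_iff.mpr hallnil]
        rfl
    · -- repeat_times < 0: both sides are batch_size empty groups
      have hAr : PySem.List.pyRange 0 rt 1 = [] := PySem.List.pyRange_one_eq_nil (by omega)
      unfold group_outputs_for_batch_repeats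
      rw [hAr]
      simp only [List.foldl_nil]
      rw [pv_foldl_id, pvB_empty]
      by_cases hg : 0 < (b' : Int) ∧ 0 < nrs
      · right
        have : (b' : Int) * rt * nrs ≤ 0 := by
          have h1 : (b' : Int) * rt ≤ 0 :=
            mul_nonpos_of_nonneg_of_nonpos (by positivity) (by omega)
          exact mul_nonpos_of_nonpos_of_nonneg h1 (by omega)
        omega
      · exact Or.inl hg

theorem group_outputs_for_batch_repeats_changed : Claim_changed_group_outputs_for_batch_repeats := by
  unfold Claim_changed_group_outputs_for_batch_repeats; decide

theorem group_outputs_for_batch_repeats_tight : Claim_exact_group_outputs_for_batch_repeats := by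
  intro xs bs rt nrs _ hd heq
  obtain ⟨hneg, hbpos, hrpos, hlen⟩ := hd
  obtain ⟨b', rfl⟩ : ∃ b' : Nat, bs = (b' : Int) :=
    ⟨bs.toNat, (Int.toNat_of_nonneg (by omega)).symm⟩
  obtain ⟨r', rfl⟩ : ∃ r' : Nat, rt = (r' : Int) := ⟨rt.toNat, (Int.toNat_of_nonneg (by omega)).symm⟩
  have hb : 0 < b' := by omega
  have hr : 0 < r' := by omega
  rw [pvA_char, pvB_empty xs (b' : Int) (r' : Int) nrs (Or.inl (by rintro ⟨_, h⟩; omega)),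
    pv_pyRange0 b', List.map_map] at heq
  -- compare the first groups
  have h0 := congrArg (fun l => l.getD 0 ([] : List Int)) heq
  simp only [] at h0
  rw [List.getD_eq_getElem _ _ (by simpa using hb), List.getD_eq_getElem _ _ (by simpa using hb)] at h0
  simp only [List.getElem_map, List.getElem_range, Function.comp_def] at h0
  -- A's first group starts with the wrapped slice xs[0 : len + nrs], which is nonempty
  set k : Nat := (-nrs).toNat with hk
  have hkpos : 0 < k := by omega
  have hklen : k < xs.length := by omega
  have hnrs : nrs = -(k : Int) := by omega
  obtain ⟨r'', rfl⟩ : ∃ r'' : Nat, r' = r'' + 1 := ⟨r' - 1, by omega⟩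
  rw [List.range_succ_eq_map, List.flatMap_cons] at h0
  have hslice : PySem.List.slice xs
      (some ((0 : Nat) * nrs + ((0:Nat) : Int) * ((b' : Int) * nrs)))
      (some (((0:Nat) : Int) * nrs + ((0:Nat) : Int) * ((b' : Int) * nrs) + nrs)) =
      xs.take (xs.length - k) := by
    have hb0 : ((0:Nat) : Int) * nrs + ((0:Nat) : Int) * ((b' : Int) * nrs) = 0 := by
      push_cast; ring
    rw [hb0, show (0 : Int) + nrs = nrs by ring, hnrs]
    rw [PySem.List.slice_zero_start, PySem.List.slice_to_neg_natCast xs k hkpos]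
  simp only [Nat.cast_zero] at hslice h0
  rw [hslice] at h0
  have : xs.take (xs.length - k) ≠ [] := by
    have : (xs.take (xs.length - k)).length = xs.length - k := by
      simp
    intro hcon
    rw [hcon] at this
    simp at this
    omega
  exact this (List.append_eq_nil_iff.mp h0).1
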